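-- pv_equiv track=rewrite | github.com/asdflj/- | test.py | fanyi
-- ===== SOURCE A (Python) =====
-- def fanyi(list_picture):
--     dic_cards = {
--         54: ('RED JOKER'), 53: ('BLACK JOKER'),
--         52: ('\u2660'' 2'), 51: ('\u2663'' 2'), 50: ('\u2665'' 2'), 49: ('\u2666'' 2'),
--         48: ('\u2660'' A'), 47: ('\u2663'' A'), 46: ('\u2665'' A'), 45: ('\u2666'' A'),
--         44: ('\u2660'' K'), 43: ('\u2663'' K'), 42: ('\u2665'' K'), 41: ('\u2666'' K'),
--         40: ('\u2660'' Q'), 39: ('\u2663'' Q'), 38: ('\u2665'' Q'), 37: ('\u2666'' Q'),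
--         36: ('\u2660'' J'), 35: ('\u2663'' J'), 34: ('\u2665'' J'), 33: ('\u2666'' J'),
--         32: ('\u2660'' 10'), 31: ('\u2663'' 10'), 30: ('\u2665'' 10'), 29: ('\u2666'' 10'),
--         28: ('\u2660'' 9'), 27: ('\u2663'' 9'), 26: ('\u2665'' 9'), 25: ('\u2666'' 9'),
--         24: ('\u2660'' 8'), 23: ('\u2663'' 8'), 22: ('\u2665'' 8'), 21: ('\u2666'' 8'),
--         20: ('\u2660'' 7'), 19: ('\u2663'' 7'), 18: ('\u2665'' 7'), 17: ('\u2666'' 7'),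
--         16: ('\u2660'' 6'), 15: ('\u2663'' 6'), 14: ('\u2665'' 6'), 13: ('\u2666'' 6'),
--         12: ('\u2660'' 5'), 11: ('\u2663'' 5'), 10: ('\u2665'' 5'), 9: ('\u2666'' 5'),
--         8: ('\u2660'' 4'), 7: ('\u2663'' 4'), 6: ('\u2665'' 4'), 5: ('\u2666'' 4'),
--         4: ('\u2660'' 3'), 3: ('\u2663'' 3'), 2: ('\u2665'' 3'), 1: ('\u2666'' 3'),
--     }
--     ser_list = []
--     for x in list_picture:
--         ser_list.append(dic_cards[x])
--     return ser_list
-- ===== SOURCE B (Python) =====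
-- def fanyi(list_picture):
--     suits = ['\u2666', '\u2665', '\u2663', '\u2660']
--     ranks = ['3', '4', '5', '6', '7', '8', '9', '10', 'J', 'Q', 'K', 'A', '2']
--     out = []
--     for x in list_picture:
--         if x == 53:
--             out.append('BLACK JOKER')
--         elif x == 54:
--             out.append('RED JOKER')
--         elif 1 <= x <= 52:
--             out.append(suits[(x - 1) % 4] + ' ' + ranks[(x - 1) // 4])
--         else:
--             raise KeyError(x)
--     return out
-- ===== Notes on version B (the rewrite author's own statement) =====
-- stated objective: simpler
-- what changed: Replaces the 54-entry literal dict with arithmetic decoding: suit = suits[(x-1)%4], rank = ranks[(x-1)//4] over two small tables, plus the two joker cases.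
import Mathlib
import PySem

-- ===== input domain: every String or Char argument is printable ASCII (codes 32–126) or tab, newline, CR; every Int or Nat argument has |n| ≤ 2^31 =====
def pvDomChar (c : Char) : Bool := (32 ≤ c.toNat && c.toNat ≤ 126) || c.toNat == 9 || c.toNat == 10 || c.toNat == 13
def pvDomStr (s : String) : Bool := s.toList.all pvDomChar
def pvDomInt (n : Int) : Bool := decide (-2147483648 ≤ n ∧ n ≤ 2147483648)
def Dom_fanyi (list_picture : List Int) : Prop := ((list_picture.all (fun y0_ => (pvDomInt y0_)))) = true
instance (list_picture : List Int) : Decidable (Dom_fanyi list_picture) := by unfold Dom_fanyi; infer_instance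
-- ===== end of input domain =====

-- B replaces A's 54-entry literal dict by suit/rank arithmetic ((x-1)%4, (x-1)//4) over two small tables; objective: simpler.

-- ===== PORT A =====
def pvDicCards : PySem.Dict Int String := PySem.Dict.ofList
  [ (54, "RED JOKER"), (53, "BLACK JOKER"),
    (52, "\u2660 2"), (51, "\u2663 2"), (50, "\u2665 2"), (49, "\u2666 2"),
    (48, "\u2660 A"), (47, "\u2663 A"), (46, "\u2665 A"), (45, "\u2666 A"),
    (44, "\u2660 K"), (43, "\u2663 K"), (42, "\u2665 K"), (41, "\u2666 K"),
    (40, "\u2660 Q"), (39, "\u2663 Q"), (38, "\u2665 Q"), (37, "\u2666 Q"),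
    (36, "\u2660 J"), (35, "\u2663 J"), (34, "\u2665 J"), (33, "\u2666 J"),
    (32, "\u2660 10"), (31, "\u2663 10"), (30, "\u2665 10"), (29, "\u2666 10"),
    (28, "\u2660 9"), (27, "\u2663 9"), (26, "\u2665 9"), (25, "\u2666 9"),
    (24, "\u2660 8"), (23, "\u2663 8"), (22, "\u2665 8"), (21, "\u2666 8"),
    (20, "\u2660 7"), (19, "\u2663 7"), (18, "\u2665 7"), (17, "\u2666 7"),
    (16, "\u2660 6"), (15, "\u2663 6"), (14, "\u2665 6"), (13, "\u2666 6"),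
    (12, "\u2660 5"), (11, "\u2663 5"), (10, "\u2665 5"), (9, "\u2666 5"),
    (8, "\u2660 4"), (7, "\u2663 4"), (6, "\u2665 4"), (5, "\u2666 4"),
    (4, "\u2660 3"), (3, "\u2663 3"), (2, "\u2665 3"), (1, "\u2666 3") ]

-- dic_cards[x] raises KeyError on a missing key; Pre_ excludes that, the port defaults to "".
def fanyi (list_picture : List Int) : List String :=
  list_picture.foldl (fun ser_list x => ser_list ++ [(pvDicCards.get? x).getD ""]) []

-- ===== PORT B =====
def pvSuits : List String := ["\u2666", "\u2665", "\u2663", "\u2660"]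
def pvRanks : List String := ["3", "4", "5", "6", "7", "8", "9", "10", "J", "Q", "K", "A", "2"]

-- Source B raises KeyError on a code outside 1..54; Pre_ excludes that, the port defaults to "".
def pvCardName (x : Int) : String :=
  if x = 53 then "BLACK JOKER"
  else if x = 54 then "RED JOKER"
  else if 1 ≤ x ∧ x ≤ 52 then
    ((PySem.List.pyGet? pvSuits (PySem.Int.mod (x - 1) 4)).getD "") ++ " " ++
    ((PySem.List.pyGet? pvRanks (PySem.Int.floordiv (x - 1) 4)).getD "")
  else ""

def fanyi_alt (list_picture : List Int) : List String :=
  list_picture.foldl (fun out x => out ++ [pvCardName x]) []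

-- ===== PRECONDITION & SPEC =====
-- Pre_ excludes exactly the inputs containing a code outside 1..54, on which A raises KeyError (B does too).
def Pre_fanyi (list_picture : List Int) : Prop :=
  ∀ x ∈ list_picture, 1 ≤ x ∧ x ≤ 54
instance (list_picture : List Int) : Decidable (Pre_fanyi list_picture) := by unfold Pre_fanyi; infer_instance
def pvWitness_fanyi : List Int := [1, 17, 52, 53, 54]

def Spec_fanyi (list_picture : List Int) (out : List String) : Prop := out = fanyi_alt list_picture
instance (list_picture : List Int) (out : List String) : Decidable (Spec_fanyi list_picture out) := by unfold Spec_fanyi; infer_instance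

-- ===== CLAIM (what is proved, stated in full; the proofs are below) =====
def Claim_equal_fanyi : Prop := ∀ (list_picture : List Int), Dom_fanyi list_picture → Pre_fanyi list_picture → Spec_fanyi list_picture (fanyi list_picture)

-- ===== LEMMAS AND PROOFS =====
set_option maxRecDepth 8192 in
theorem pvCardName_eq (x : Int) (h1 : 1 ≤ x) (h2 : x ≤ 54) :
    (pvDicCards.get? x).getD "" = pvCardName x := by
  interval_cases x <;> decide

theorem fanyi_eq_map (l : List Int) (h : Pre_fanyi l) :
    fanyi l = l.map pvCardName := by
  unfold fanyi
  rw [PySem.List.foldl_append_singleton_eq_map]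
  simp only [List.nil_append]
  exact List.map_congr_left (fun x hx => pvCardName_eq x (h x hx).1 (h x hx).2)

theorem fanyi_alt_eq_map (l : List Int) : fanyi_alt l = l.map pvCardName := by
  unfold fanyi_alt
  rw [PySem.List.foldl_append_singleton_eq_map]
  simp

-- ===== VERDICT (by name: the statement is the Claim_ definition above) =====
theorem fanyi_spec : Claim_equal_fanyi := by
  intro l _ hpre
  unfold Spec_fanyi
  rw [fanyi_eq_map l hpre, fanyi_alt_eq_map]
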